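-- pv_equiv track=rewrite | github.com/VinayKandul/promptforge-ai | backend/prompt_engine/prompt_architect.py | _build_constraints
-- ===== SOURCE A (Python) =====
-- from typing import Dict, Optional
--
-- def _build_constraints(base_constraints: list, context_data: Dict) -> str:
--     """Build the constraints section."""
--     constraints = list(base_constraints)
--
--     audience = context_data.get("audience", "general")
--     if audience == "beginner":
--         constraints.append("Use simple language and avoid jargon")
--         constraints.append("Define any technical terms used")
--     elif audience == "technical":
--         constraints.append("Use precise technical language")
--         constraints.append("Include implementation details")
--     elif audience == "business":
--         constraints.append("Focus on business impact and ROI")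
--         constraints.append("Use professional business language")
--
--     scope = context_data.get("scope", "moderate")
--     if scope == "brief":
--         constraints.append("Keep response under 500 words")
--     elif scope == "comprehensive":
--         constraints.append("Provide detailed coverage — 1000+ words if needed")
--
--     return "\n".join(f"- {c}" for c in constraints)
-- ===== SOURCE B (Python) =====
-- _RULES = [
--     ("audience", "general", "beginner", "Use simple language and avoid jargon"),
--     ("audience", "general", "beginner", "Define any technical terms used"),
--     ("audience", "general", "technical", "Use precise technical language"),
--     ("audience", "general", "technical", "Include implementation details"),
--     ("audience", "general", "business", "Focus on business impact and ROI"),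
--     ("audience", "general", "business", "Use professional business language"),
--     ("scope", "moderate", "brief", "Keep response under 500 words"),
--     ("scope", "moderate", "comprehensive", "Provide detailed coverage — 1000+ words if needed"),
-- ]
--
--
-- def _build_constraints(base_constraints: list, context_data: dict) -> str:
--     out = ""
--     sep = "- "
--     for c in base_constraints:
--         out += sep + c
--         sep = "\n- "
--     for field, default, value, text in _RULES:
--         if context_data.get(field, default) == value:
--             out += sep + text
--             sep = "\n- "
--     return out
-- ===== Notes on version B (the rewrite author's own statement) =====
-- stated objective: alternative
-- what changed: B builds the output string directly in one accumulator pass (prefix-separator threading) over the base list and a flat (field, default, value, text) rule table, instead of A's two if/elif chains appending to a list that is then joined.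
import Mathlib
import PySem

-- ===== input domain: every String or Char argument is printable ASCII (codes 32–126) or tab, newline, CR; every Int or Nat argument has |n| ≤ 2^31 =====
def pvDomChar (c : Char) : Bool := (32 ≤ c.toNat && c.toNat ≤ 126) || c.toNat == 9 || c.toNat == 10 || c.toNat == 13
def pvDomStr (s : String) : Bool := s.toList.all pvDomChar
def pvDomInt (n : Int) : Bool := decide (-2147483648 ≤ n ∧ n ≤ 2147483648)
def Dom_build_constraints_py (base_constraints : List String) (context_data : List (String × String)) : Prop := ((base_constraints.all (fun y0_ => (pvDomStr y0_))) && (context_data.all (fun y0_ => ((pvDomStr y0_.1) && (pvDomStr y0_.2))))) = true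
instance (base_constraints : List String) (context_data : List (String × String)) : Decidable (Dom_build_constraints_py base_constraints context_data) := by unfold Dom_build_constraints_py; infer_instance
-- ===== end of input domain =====

-- B builds the string in one accumulator pass over a flat rule table instead of A's
-- list-append branch chains plus join (alternative decomposition); same return value.

-- dict.get(k, default) on an association list: first match, else the default
def pvDictGet (cd : List (String × String)) (k dflt : String) : String :=
  match cd with
  | [] => dflt
  | (k', v) :: rest => if k' == k then v else pvDictGet rest k dflt

-- ===== PORT A =====
def build_constraints_py (base_constraints : List String) (context_data : List (String × String)) : String :=
  let constraints := base_constraints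
  let audience := pvDictGet context_data "audience" "general"
  let constraints :=
    if audience == "beginner" then
      (constraints ++ ["Use simple language and avoid jargon"]) ++ ["Define any technical terms used"]
    else if audience == "technical" then
      (constraints ++ ["Use precise technical language"]) ++ ["Include implementation details"]
    else if audience == "business" then
      (constraints ++ ["Focus on business impact and ROI"]) ++ ["Use professional business language"]
    else constraints
  let scope := pvDictGet context_data "scope" "moderate"
  let constraints :=
    if scope == "brief" then
      constraints ++ ["Keep response under 500 words"]
    else if scope == "comprehensive" then
      constraints ++ ["Provide detailed coverage — 1000+ words if needed"]
    else constraints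
  PySem.Str.join "\n" (constraints.map (fun c => "- " ++ c))

-- ===== PORT B =====
-- flat rule table: (field, default, value, text)
def RULES : List (String × String × String × String) :=
  [("audience", "general", "beginner", "Use simple language and avoid jargon"),
   ("audience", "general", "beginner", "Define any technical terms used"),
   ("audience", "general", "technical", "Use precise technical language"),
   ("audience", "general", "technical", "Include implementation details"),
   ("audience", "general", "business", "Focus on business impact and ROI"),
   ("audience", "general", "business", "Use professional business language"),
   ("scope", "moderate", "brief", "Keep response under 500 words"),
   ("scope", "moderate", "comprehensive", "Provide detailed coverage — 1000+ words if needed")]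

def build_constraints_py_alt (base_constraints : List String) (context_data : List (String × String)) : String :=
  let st := base_constraints.foldl
    (fun (st : String × String) c => (st.1 ++ st.2 ++ c, "\n- ")) ("", "- ")
  let st := RULES.foldl
    (fun (st : String × String) r =>
      if pvDictGet context_data r.1 r.2.1 == r.2.2.1 then (st.1 ++ st.2 ++ r.2.2.2, "\n- ") else st)
    st
  st.1

-- ===== PRECONDITION & SPEC =====
def Spec_build_constraints_py (base_constraints : List String) (context_data : List (String × String)) (out : String) : Prop := out = build_constraints_py_alt base_constraints context_data
instance (base_constraints : List String) (context_data : List (String × String)) (out : String) : Decidable (Spec_build_constraints_py base_constraints context_data out) := by unfold Spec_build_constraints_py; infer_instance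

-- ===== CLAIM =====
def Claim_equal_build_constraints_py : Prop := ∀ (base_constraints : List String) (context_data : List (String × String)), Dom_build_constraints_py base_constraints context_data → Spec_build_constraints_py base_constraints context_data (build_constraints_py base_constraints context_data)

-- ===== LEMMAS AND PROOFS =====

-- matched constraint texts, as a filter over the rule table
def pvMatched (cd : List (String × String)) : List String :=
  (RULES.filter (fun r => pvDictGet cd r.1 r.2.1 == r.2.2.1)).map (fun r => r.2.2.2)

-- tail of the emitted string after the first line
def pvTail : List String → String
  | [] => ""
  | c :: cs => "\n- " ++ c ++ pvTail cs

def pvStep (st : String × String) (c : String) : String × String := (st.1 ++ st.2 ++ c, "\n- ")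

theorem fold_tail (l : List String) : ∀ out : String,
    l.foldl pvStep (out, "\n- ") = (out ++ pvTail l, "\n- ") := by
  induction l with
  | nil => intro out; simp [pvTail]
  | cons c cs ih =>
    intro out
    simp only [List.foldl, pvStep, pvTail]
    rw [ih]
    simp [String.append_assoc]

theorem join_tail (cs : List String) : ∀ c : String,
    PySem.Str.join "\n" ((c :: cs).map (fun c => "- " ++ c)) = "- " ++ c ++ pvTail cs := by
  induction cs with
  | nil =>
    intro c
    apply String.toList_inj.mp
    simp [PySem.Str.toList_join, PySem.Chars.join, List.intercalate, pvTail]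
  | cons d ds ih =>
    intro c
    apply String.toList_inj.mp
    rw [PySem.Str.toList_join]
    simp only [List.map, PySem.Chars.join_cons_cons]
    have h := congrArg String.toList (ih d)
    rw [PySem.Str.toList_join] at h
    simp only [List.map] at h
    simp only [pvTail, String.toList_append] at h ⊢
    rw [h]
    simp

theorem emit_eq (l : List String) :
    (l.foldl pvStep ("", "- ")).1 = PySem.Str.join "\n" (l.map (fun c => "- " ++ c)) := by
  cases l with
  | nil => simp [PySem.Str.join, PySem.Chars.join, List.intercalate]
  | cons c cs =>
    simp only [List.foldl, pvStep]
    rw [show ("" : String) ++ "- " ++ c = "- " ++ c by simp, fold_tail, join_tail]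

-- B's rule fold = emitting exactly the filtered texts
theorem rules_fold_eq (cd : List (String × String)) : ∀ (rs : List (String × String × String × String)) (st : String × String),
    rs.foldl (fun (st : String × String) r =>
        if pvDictGet cd r.1 r.2.1 == r.2.2.1 then (st.1 ++ st.2 ++ r.2.2.2, "\n- ") else st) st
      = ((rs.filter (fun r => pvDictGet cd r.1 r.2.1 == r.2.2.1)).map (fun r => r.2.2.2)).foldl pvStep st := by
  intro rs
  induction rs with
  | nil => intro st; rfl
  | cons r rest ih =>
    intro st
    cases h : (pvDictGet cd r.1 r.2.1 == r.2.2.1) with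
    | true =>
      simp only [List.foldl_cons, List.filter_cons, h, if_true, List.map_cons]
      exact ih _
    | false =>
      simp only [List.foldl_cons, List.filter_cons, h, Bool.false_eq_true, if_false]
      exact ih _

-- A's if/elif constraint list equals base ++ the filtered rule texts
theorem chain_eq_matched (bc : List String) (cd : List (String × String)) :
    (let audience := pvDictGet cd "audience" "general"
     let constraints :=
       if audience == "beginner" then
         (bc ++ ["Use simple language and avoid jargon"]) ++ ["Define any technical terms used"]
       else if audience == "technical" then
         (bc ++ ["Use precise technical language"]) ++ ["Include implementation details"]
       else if audience == "business" then
         (bc ++ ["Focus on business impact and ROI"]) ++ ["Use professional business language"]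
       else bc
     let scope := pvDictGet cd "scope" "moderate"
     if scope == "brief" then
       constraints ++ ["Keep response under 500 words"]
     else if scope == "comprehensive" then
       constraints ++ ["Provide detailed coverage — 1000+ words if needed"]
     else constraints)
    = bc ++ pvMatched cd := by
  by_cases h1 : pvDictGet cd "audience" "general" = "beginner" <;>
    by_cases h2 : pvDictGet cd "audience" "general" = "technical" <;>
    by_cases h3 : pvDictGet cd "audience" "general" = "business" <;>
    by_cases g1 : pvDictGet cd "scope" "moderate" = "brief" <;>
    by_cases g2 : pvDictGet cd "scope" "moderate" = "comprehensive" <;>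
      simp_all [pvMatched, RULES, beq_iff_eq]

-- ===== VERDICT =====
theorem build_constraints_py_spec : Claim_equal_build_constraints_py := by
  intro bc cd _
  show build_constraints_py bc cd = build_constraints_py_alt bc cd
  simp only [build_constraints_py, build_constraints_py_alt]
  rw [chain_eq_matched bc cd, rules_fold_eq cd]
  show PySem.Str.join "\n" ((bc ++ pvMatched cd).map (fun c => "- " ++ c))
    = (List.foldl pvStep (List.foldl pvStep ("", "- ") bc) (pvMatched cd)).1
  rw [← List.foldl_append]
  exact (emit_eq (bc ++ pvMatched cd)).symm
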